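-- pv_equiv track=rewrite | github.com/JLoureir0/SCRI | pyversion/glucose.py | reading_stuck_at
-- ===== SOURCE A (Python) =====
-- def reading_stuck_at(list_of_readings):
--     #CHECK: if the two previous valid values are equal to the current value sensor is stuck at that value
--
--     for i in range(len(list_of_readings)-1, -1, -1):
--         if(i > 1):
--             j = i
--             repeated = 0
--
--             while(j != 0 and repeated < 2):
--                 if(list_of_readings[j-1][0] != '--'):
--                     if(list_of_readings[i][0] == list_of_readings[j-1][0]):
--                         repeated += 1
--                     else:
--                         break
--                 j-=1
--
--             if(repeated == 2):
--                 list_of_readings[i][0] = '--'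
--
--             j = i
--             repeated = 0
--
--             while(j != 0 and repeated < 2):
--                 if(list_of_readings[j-1][1] != '--'):
--                     if(list_of_readings[i][1] == list_of_readings[j-1][1]):
--                         repeated += 1
--                     else:
--                         break
--                 j-=1
--
--             if(repeated == 2):
--                 list_of_readings[i][1] = '--'
--
--     return list_of_readings
-- ===== SOURCE B (Python) =====
-- def reading_stuck_at(list_of_readings):
--     # Single left-to-right sweep: for each column keep the last two non-'--'
--     # original values; a reading equal to both is marked stuck ('--').
--     # Mutates the rows in place (like the original) and returns the list.
--     if len(list_of_readings) < 3:
--         return list_of_readings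
--     a1 = a2 = b1 = b2 = None
--     for row in list_of_readings:
--         u, v = row[0], row[1]
--         if u != '--':
--             if u == a1 == a2:
--                 row[0] = '--'
--             a2, a1 = a1, u
--         if v != '--':
--             if v == b1 == b2:
--                 row[1] = '--'
--             b2, b1 = b1, v
--     return list_of_readings
-- ===== Notes on version B (the rewrite author's own statement) =====
-- stated objective: alternative
-- what changed: Replaced A's backward rescan over previous rows at every index (per column) by a single left-to-right sweep that keeps the last two non-'--' original values of each column in buffer variables.
import Mathlib
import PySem

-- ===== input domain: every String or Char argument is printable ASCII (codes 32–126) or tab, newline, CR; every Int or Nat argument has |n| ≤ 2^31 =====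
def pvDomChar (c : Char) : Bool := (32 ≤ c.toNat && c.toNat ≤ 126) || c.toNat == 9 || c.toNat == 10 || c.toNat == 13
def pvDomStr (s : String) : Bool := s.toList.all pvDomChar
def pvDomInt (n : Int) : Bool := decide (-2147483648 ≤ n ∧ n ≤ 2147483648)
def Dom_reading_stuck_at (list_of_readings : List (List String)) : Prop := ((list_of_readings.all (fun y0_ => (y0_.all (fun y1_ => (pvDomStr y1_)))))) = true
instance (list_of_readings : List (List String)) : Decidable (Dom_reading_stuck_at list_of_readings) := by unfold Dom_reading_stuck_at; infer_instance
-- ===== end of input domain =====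

-- B replaces A's per-index backward rescans by one forward sweep keeping the last two
-- non-'--' values of each column in buffers (objective: alternative single-pass algorithm).
-- Equivalence is about the RETURN value; both Pythons also mutate the rows in place alike.

-- ===== PORT A =====
-- list_of_readings[i][k] with a default: inside Pre_ every access is in range,
-- so the default is never the result Python would not produce.
def pvCell (rows : List (List String)) (i : Int) (k : Int) : String :=
  PySem.List.pyGetD (PySem.List.pyGetD rows i []) k ""

-- list_of_readings[i][k] = '--' ; i is a loop index from range(...), hence 0 ≤ i (toNat is exact there)
def pvSetCell (rows : List (List String)) (i : Nat) (k : Nat) : List (List String) :=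
  rows.set i ((rows.getD i []).set k "--")

-- the while loop; Lean fuel j+1 is Python's j, so Python's list[j-1][k] is pvCell rows j k
def pvWhileA (rows : List (List String)) (i : Int) (k : Int) : Nat → Nat → Nat
  | 0, rep => rep
  | j+1, rep =>
    if rep < 2 then
      if pvCell rows (j : Int) k ≠ "--" then
        if pvCell rows i k = pvCell rows (j : Int) k then pvWhileA rows i k j (rep + 1)
        else rep
      else pvWhileA rows i k j rep
    else rep

-- the body of the for loop at index i
def pvBodyA (rows : List (List String)) (i : Int) : List (List String) :=
  if i > 1 then
    let rep0 := pvWhileA rows i 0 i.toNat 0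
    let rows1 := if rep0 = 2 then pvSetCell rows i.toNat 0 else rows
    let rep1 := pvWhileA rows1 i 1 i.toNat 0
    if rep1 = 2 then pvSetCell rows1 i.toNat 1 else rows1
  else rows

def reading_stuck_at (list_of_readings : List (List String)) : List (List String) :=
  (PySem.List.pyRange ((list_of_readings.length : Int) - 1) (-1) (-1)).foldl pvBodyA list_of_readings

-- ===== PORT B =====
-- the single forward sweep with the four buffer variables a1 a2 b1 b2 of Source B
def pvSweepB : List (List String) → Option String → Option String → Option String → Option String → List (List String)
  | [], _, _, _, _ => []
  | row :: rest, a1, a2, b1, b2 =>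
    let u := PySem.List.pyGetD row 0 ""
    let v := PySem.List.pyGetD row 1 ""
    let s0 : List String × Option String × Option String :=
      if u ≠ "--" then
        ((if a1 = some u ∧ a2 = some u then row.set 0 "--" else row), some u, a1)
      else (row, a1, a2)
    let s1 : List String × Option String × Option String :=
      if v ≠ "--" then
        ((if b1 = some v ∧ b2 = some v then s0.1.set 1 "--" else s0.1), some v, b1)
      else (s0.1, b1, b2)
    s1.1 :: pvSweepB rest s0.2.1 s0.2.2 s1.2.1 s1.2.2

def reading_stuck_at_alt (list_of_readings : List (List String)) : List (List String) :=
  if list_of_readings.length < 3 then list_of_readings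
  else pvSweepB list_of_readings none none none none

-- ===== PRECONDITION & SPEC =====
-- Pre_ excludes lists of three or more rows containing a row with fewer than two entries:
-- Python A raises IndexError on most of them and, when its backward scans break before
-- touching the short row, returns a value B's full sweep cannot reach (B raises there).
def Pre_reading_stuck_at (list_of_readings : List (List String)) : Prop :=
  list_of_readings.length ≤ 2 ∨ ∀ row ∈ list_of_readings, 2 ≤ row.length
instance (list_of_readings : List (List String)) : Decidable (Pre_reading_stuck_at list_of_readings) := by unfold Pre_reading_stuck_at; infer_instance

def pvWitness_reading_stuck_at : List (List String) :=
  [["5", "7"], ["5", "8"], ["5", "8"], ["5", "8"], ["6", "9"]]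

def Spec_reading_stuck_at (list_of_readings : List (List String)) (out : List (List String)) : Prop := out = reading_stuck_at_alt list_of_readings
instance (list_of_readings : List (List String)) (out : List (List String)) : Decidable (Spec_reading_stuck_at list_of_readings out) := by unfold Spec_reading_stuck_at; infer_instance

-- ===== CLAIM (what is proved, stated in full; the proofs are below) =====
def Claim_equal_reading_stuck_at : Prop := ∀ (list_of_readings : List (List String)), Dom_reading_stuck_at list_of_readings → Pre_reading_stuck_at list_of_readings → Spec_reading_stuck_at list_of_readings (reading_stuck_at list_of_readings)

-- ===== LEMMAS AND PROOFS =====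
-- (the equality of the two ports in fact holds for every input; Pre_ marks where Python A returns)

-- proof-side abbreviations: the reversed column k of a block of rows, and its valid entries
def pvColRev (k : Int) (xs : List (List String)) : List String :=
  xs.reverse.map (fun row => PySem.List.pyGetD row k "")

def pvFF (k : Int) (xs : List (List String)) : List String :=
  (pvColRev k xs).filter (fun c => decide (c ≠ "--"))

-- the buffer update of one row in B's sweep, and the buffer state after a block of rows
def pvStep (k : Int) (s : Option String × Option String) (row : List String) :
    Option String × Option String :=
  let v := PySem.List.pyGetD row k ""
  if v ≠ "--" then (some v, s.1) else s

def pvState (k : Int) (xs : List (List String)) (s : Option String × Option String) :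
    Option String × Option String :=
  xs.foldl (pvStep k) s

-- how B's sweep transforms one row, given the two buffers
def pvProc (r : List String) (p q : Option String × Option String) : List String :=
  let u := PySem.List.pyGetD r 0 ""
  let v := PySem.List.pyGetD r 1 ""
  let r1 := if u ≠ "--" ∧ p.1 = some u ∧ p.2 = some u then r.set 0 "--" else r
  if v ≠ "--" ∧ q.1 = some v ∧ q.2 = some v then r1.set 1 "--" else r1

-- A's while loop, rephrased over the list of already-extracted cell values
def pvScan (v : String) : List String → Nat → Nat
  | [], rep => rep
  | c :: cs, rep =>
    if rep < 2 then
      if c ≠ "--" then (if v = c then pvScan v cs (rep + 1) else rep) else pvScan v cs rep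
    else rep

theorem pvSweepB_append (xs : List (List String)) (r : List String) :
    ∀ a1 a2 b1 b2, pvSweepB (xs ++ [r]) a1 a2 b1 b2 =
      pvSweepB xs a1 a2 b1 b2 ++ [pvProc r (pvState 0 xs (a1, a2)) (pvState 1 xs (b1, b2))] := by
  induction xs with
  | nil =>
    intro a1 a2 b1 b2
    by_cases hu : PySem.List.pyGetD r (0:Int) "" = "--" <;>
      by_cases hv : PySem.List.pyGetD r (1:Int) "" = "--" <;>
        simp [pvSweepB, pvProc, pvState, hu, hv]
  | cons x xs ih =>
    intro a1 a2 b1 b2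
    by_cases hu : PySem.List.pyGetD x (0:Int) "" = "--"
    · by_cases hv : PySem.List.pyGetD x (1:Int) "" = "--"
      · simp [pvSweepB, pvState, pvStep, List.foldl_cons, hu, hv, ih]
      · simp [pvSweepB, pvState, pvStep, List.foldl_cons, hu, hv, ih]
    · by_cases hv : PySem.List.pyGetD x (1:Int) "" = "--"
      · simp [pvSweepB, pvState, pvStep, List.foldl_cons, hu, hv, ih]
      · simp [pvSweepB, pvState, pvStep, List.foldl_cons, hu, hv, ih]

theorem pvState_char (k : Int) (xs : List (List String)) :
    pvState k xs (none, none) = ((pvFF k xs).head?, (pvFF k xs)[1]?) := by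
  induction xs using List.reverseRecOn with
  | nil => simp [pvState, pvFF, pvColRev]
  | append_singleton ys r ih =>
    have hst : pvState k (ys ++ [r]) (none, none) = pvStep k (pvState k ys (none, none)) r := by
      simp [pvState, List.foldl_append]
    have hF : pvFF k (ys ++ [r]) =
        if PySem.List.pyGetD r k "" ≠ "--" then PySem.List.pyGetD r k "" :: pvFF k ys
        else pvFF k ys := by
      simp [pvFF, pvColRev, List.filter_cons]
    by_cases h : PySem.List.pyGetD r k "" = "--" <;>
      simp [hst, hF, ih, pvStep, h, List.head?_eq_getElem?]

theorem pvScan_two (v : String) (cs : List String) : pvScan v cs 2 = 2 := by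
  cases cs <;> simp [pvScan]

theorem pvScan_one (v : String) (cs : List String) :
    pvScan v cs 1 = 2 ↔ (cs.filter (fun c => decide (c ≠ "--"))).head? = some v := by
  induction cs with
  | nil => simp [pvScan]
  | cons c cs ih =>
    by_cases hc : c = "--"
    · simpa [pvScan, hc] using ih
    · have hstep : pvScan v (c :: cs) 1 = if v = c then pvScan v cs 2 else 1 := by
        simp [pvScan, hc]
      have hfil : (c :: cs).filter (fun c => decide (c ≠ "--")) =
          c :: cs.filter (fun c => decide (c ≠ "--")) := by simp [hc]
      rw [hstep, hfil]
      by_cases hvc : v = c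
      · simp [hvc, pvScan_two]
      · simp [hvc, Ne.symm hvc]

theorem pvScan_zero (v : String) (cs : List String) :
    pvScan v cs 0 = 2 ↔ ((cs.filter (fun c => decide (c ≠ "--"))).head? = some v ∧
      (cs.filter (fun c => decide (c ≠ "--")))[1]? = some v) := by
  induction cs with
  | nil => simp [pvScan]
  | cons c cs ih =>
    by_cases hc : c = "--"
    · simpa [pvScan, hc] using ih
    · have hstep : pvScan v (c :: cs) 0 = if v = c then pvScan v cs 1 else 0 := by
        simp [pvScan, hc]
      have hfil : (c :: cs).filter (fun c => decide (c ≠ "--")) =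
          c :: cs.filter (fun c => decide (c ≠ "--")) := by simp [hc]
      rw [hstep, hfil]
      by_cases hvc : v = c
      · simp [hvc, pvScan_one, List.head?_eq_getElem?]
      · simp [hvc, Ne.symm hvc]

theorem pvCell_nat (rows : List (List String)) (j : Nat) (h : j < rows.length) (k : Int) :
    pvCell rows (j : Int) k = PySem.List.pyGetD rows[j] k "" := by
  simp [pvCell, List.getD, List.getElem?_eq_getElem h]

theorem pvWhileA_eq_scan (rows : List (List String)) (i k : Int) (j rep : Nat)
    (h : j ≤ rows.length) :
    pvWhileA rows i k j rep =
      pvScan (pvCell rows i k) ((rows.take j).reverse.map (fun row => PySem.List.pyGetD row k "")) rep := by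
  induction j generalizing rep with
  | zero => simp [pvWhileA, pvScan]
  | succ j ih =>
    have hj : j < rows.length := by omega
    have htake : rows.take (j + 1) = rows.take j ++ [rows[j]] := by
      rw [List.take_add_one]; simp [List.getElem?_eq_getElem hj]
    rw [htake]
    simp only [List.reverse_append, List.reverse_singleton, List.singleton_append, List.map_cons]
    rw [← pvCell_nat rows j hj k]
    simp only [pvWhileA, pvScan]
    split_ifs <;> first | rfl | exact ih _ (by omega)

theorem pvCell_append (xs ys : List (List String)) (i : Int) (k : Int)
    (h0 : 0 ≤ i) (h : i < (xs.length : Int)) : pvCell (xs ++ ys) i k = pvCell xs i k := by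
  obtain ⟨n, rfl⟩ : ∃ n : Nat, i = (n : Int) := ⟨i.toNat, (Int.toNat_of_nonneg h0).symm⟩
  have hn : n < xs.length := by exact_mod_cast h
  simp [pvCell, List.getD, List.getElem?_append_left hn]

theorem pvWhileA_append (xs ys : List (List String)) (i k : Int) (j rep : Nat)
    (h0 : 0 ≤ i) (h : i < (xs.length : Int)) (hj : j ≤ xs.length) :
    pvWhileA (xs ++ ys) i k j rep = pvWhileA xs i k j rep := by
  rw [pvWhileA_eq_scan _ _ _ _ _ (by simp; omega), pvWhileA_eq_scan _ _ _ _ _ hj,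
    List.take_append_of_le_length hj, pvCell_append xs ys i k h0 h]

theorem pvSetCell_append (xs : List (List String)) (y : List String) (n k : Nat)
    (h : n < xs.length) : pvSetCell (xs ++ [y]) n k = pvSetCell xs n k ++ [y] := by
  simp [pvSetCell, List.getD, List.getElem?_append_left h, List.set_append_left _ _ h]

theorem pvSetCell_length (xs : List (List String)) (n k : Nat) :
    (pvSetCell xs n k).length = xs.length := by
  simp [pvSetCell]

theorem pvBodyA_append (xs : List (List String)) (y : List String) (i : Int)
    (h0 : 0 ≤ i) (h : i < (xs.length : Int)) : pvBodyA (xs ++ [y]) i = pvBodyA xs i ++ [y] := by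
  have htn : i.toNat < xs.length := by omega
  have htle : i.toNat ≤ xs.length := le_of_lt htn
  unfold pvBodyA
  by_cases h1 : i > 1
  · simp only [h1, if_true]
    rw [pvWhileA_append xs [y] i 0 i.toNat 0 h0 h htle]
    by_cases hr0 : pvWhileA xs i 0 i.toNat 0 = 2
    · simp only [hr0, if_true]
      rw [pvSetCell_append xs y i.toNat 0 htn]
      rw [pvWhileA_append (pvSetCell xs i.toNat 0) [y] i 1 i.toNat 0 h0
        (by rw [pvSetCell_length]; exact h) (by rw [pvSetCell_length]; exact htle)]
      by_cases hr1 : pvWhileA (pvSetCell xs i.toNat 0) i 1 i.toNat 0 = 2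
      · simp only [hr1, if_true]
        rw [pvSetCell_append _ y i.toNat 1 (by rw [pvSetCell_length]; exact htn)]
      · simp only [hr1, if_false]
    · simp only [hr0, if_false]
      rw [pvWhileA_append xs [y] i 1 i.toNat 0 h0 h htle]
      by_cases hr1 : pvWhileA xs i 1 i.toNat 0 = 2
      · simp only [hr1, if_true]
        rw [pvSetCell_append xs y i.toNat 1 htn]
      · simp only [hr1, if_false]
  · simp only [h1, if_false]

theorem pvBodyA_length (xs : List (List String)) (i : Int) :
    (pvBodyA xs i).length = xs.length := by
  simp only [pvBodyA]
  split_ifs <;> simp [pvSetCell]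

theorem pvFoldLoc (l : List Int) :
    ∀ (xs : List (List String)) (y : List String),
      (∀ i ∈ l, 0 ≤ i ∧ i < (xs.length : Int)) →
      l.foldl pvBodyA (xs ++ [y]) = l.foldl pvBodyA xs ++ [y] := by
  induction l with
  | nil => simp
  | cons i l ih =>
    intro xs y h
    have hi := h i (List.mem_cons_self ..)
    simp only [List.foldl_cons]
    rw [pvBodyA_append xs y i hi.1 hi.2, ih]
    intro j hj
    have := h j (List.mem_cons_of_mem _ hj)
    rw [pvBodyA_length]
    exact this

theorem pvFF_length_le (k : Int) (xs : List (List String)) : (pvFF k xs).length ≤ xs.length := by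
  calc (pvFF k xs).length ≤ (pvColRev k xs).length := List.length_filter_le _ _
  _ = xs.length := by simp [pvColRev]

theorem pvHead?_filter_ne (cs : List String) (u : String)
    (h : (cs.filter (fun c => decide (c ≠ "--"))).head? = some u) : u ≠ "--" := by
  have hm : u ∈ cs.filter (fun c => decide (c ≠ "--")) := List.mem_of_mem_head? h
  simpa using (List.mem_filter.mp hm).2

theorem pvLast (xs : List (List String)) (r : List String) (h2 : 2 ≤ xs.length) :
    pvBodyA (xs ++ [r]) (xs.length : Int) =
      xs ++ [pvProc r (pvState 0 xs (none, none)) (pvState 1 xs (none, none))] := by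
  have hgt : (xs.length : Int) > 1 := by exact_mod_cast h2
  have htn : ((xs.length : Int)).toNat = xs.length := Int.toNat_natCast _
  have hset : ∀ (r' : List String) (k : Nat),
      pvSetCell (xs ++ [r']) xs.length k = xs ++ [r'.set k "--"] := by
    intro r' k
    simp [pvSetCell, List.getD, List.set_append_right]
  have hW : ∀ (r' : List String) (k : Int),
      pvWhileA (xs ++ [r']) (xs.length : Int) k xs.length 0 =
        pvScan (PySem.List.pyGetD r' k "") (pvColRev k xs) 0 := by
    intro r' k
    rw [pvWhileA_eq_scan _ _ _ _ _ (by simp)]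
    rw [List.take_left]
    have hc : pvCell (xs ++ [r']) (xs.length : Int) k = PySem.List.pyGetD r' k "" := by
      simp [pvCell, List.getD]
    rw [hc]
    rfl
  have hset1get : ∀ r' : List String,
      PySem.List.pyGetD (r'.set 0 "--") (1:Int) "" = PySem.List.pyGetD r' (1:Int) "" := by
    intro r'
    have hne : (r'.set 0 "--")[1]? = r'[1]? := List.getElem?_set_ne (by decide)
    simp [pysem, List.getD, hne]
  obtain ⟨u, hu⟩ : ∃ u, PySem.List.pyGetD r (0:Int) "" = u := ⟨_, rfl⟩
  obtain ⟨v, hv⟩ : ∃ v, PySem.List.pyGetD r (1:Int) "" = v := ⟨_, rfl⟩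
  have hcond0 : (pvScan u (pvColRev 0 xs) 0 = 2) ↔
      (u ≠ "--" ∧ (pvState 0 xs (none, none)).1 = some u ∧
        (pvState 0 xs (none, none)).2 = some u) := by
    rw [pvScan_zero, pvState_char]
    simp only [pvFF]
    constructor
    · rintro ⟨ha, hb⟩
      exact ⟨pvHead?_filter_ne _ _ ha, ha, hb⟩
    · rintro ⟨-, ha, hb⟩
      exact ⟨ha, hb⟩
  have hcond1 : (pvScan v (pvColRev 1 xs) 0 = 2) ↔
      (v ≠ "--" ∧ (pvState 1 xs (none, none)).1 = some v ∧
        (pvState 1 xs (none, none)).2 = some v) := by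
    rw [pvScan_zero, pvState_char]
    simp only [pvFF]
    constructor
    · rintro ⟨ha, hb⟩
      exact ⟨pvHead?_filter_ne _ _ ha, ha, hb⟩
    · rintro ⟨-, ha, hb⟩
      exact ⟨ha, hb⟩
  simp only [pvBodyA]
  rw [if_pos hgt, htn, hW r 0, hu]
  by_cases hA0 : pvScan u (pvColRev 0 xs) 0 = 2
  · rw [if_pos hA0, hset r 0, hW (r.set 0 "--") 1, hset1get r, hv]
    by_cases hA1 : pvScan v (pvColRev 1 xs) 0 = 2
    · rw [if_pos hA1, hset (r.set 0 "--") 1]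
      simp only [pvProc]
      rw [hu, hv, if_pos (hcond0.mp hA0), if_pos (hcond1.mp hA1)]
    · rw [if_neg hA1]
      simp only [pvProc]
      rw [hu, hv, if_pos (hcond0.mp hA0), if_neg (fun hc => hA1 (hcond1.mpr hc))]
  · rw [if_neg hA0, hW r 1, hv]
    by_cases hA1 : pvScan v (pvColRev 1 xs) 0 = 2
    · rw [if_pos hA1, hset r 1]
      simp only [pvProc]
      rw [hu, hv, if_neg (fun hc => hA0 (hcond0.mpr hc)), if_pos (hcond1.mp hA1)]
    · rw [if_neg hA1]
      simp only [pvProc]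
      rw [hu, hv, if_neg (fun hc => hA0 (hcond0.mpr hc)), if_neg (fun hc => hA1 (hcond1.mpr hc))]

theorem pvProc_short (r : List String) (xs : List (List String)) (h : xs.length ≤ 1) :
    pvProc r (pvState 0 xs (none, none)) (pvState 1 xs (none, none)) = r := by
  have h0 : (pvState 0 xs (none, none)).2 = none := by
    rw [pvState_char]
    exact List.getElem?_eq_none (by have := pvFF_length_le 0 xs; omega)
  have h1 : (pvState 1 xs (none, none)).2 = none := by
    rw [pvState_char]
    exact List.getElem?_eq_none (by have := pvFF_length_le 1 xs; omega)
  simp [pvProc, h0, h1]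

theorem pvMain (rows : List (List String)) :
    reading_stuck_at rows = pvSweepB rows none none none none := by
  induction rows using List.reverseRecOn with
  | nil => decide
  | append_singleton xs r ih =>
    unfold reading_stuck_at
    have hlen : (((xs ++ [r]).length : Int)) - 1 = (xs.length : Int) := by
      simp [List.length_append]
    rw [hlen, PySem.List.pyRange_neg_one_cons (by omega), List.foldl_cons]
    have hmem : ∀ i ∈ PySem.List.pyRange ((xs.length : Int) - 1) (-1) (-1),
        0 ≤ i ∧ i < (xs.length : Int) := by
      intro i hi
      have := PySem.List.mem_pyRange_neg_one.mp hi
      omega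
    have hA : (PySem.List.pyRange ((xs.length : Int) - 1) (-1) (-1)).foldl pvBodyA xs =
        reading_stuck_at xs := rfl
    by_cases h2 : 2 ≤ xs.length
    · rw [pvLast xs r h2, pvFoldLoc _ _ _ hmem, hA, ih, pvSweepB_append]
    · have hb : pvBodyA (xs ++ [r]) (xs.length : Int) = xs ++ [r] := by
        simp only [pvBodyA]
        rw [if_neg (by omega)]
      rw [hb, pvFoldLoc _ _ _ hmem, hA, ih, pvSweepB_append,
        pvProc_short r xs (by omega)]

theorem pvSweepB_short (rows : List (List String)) :
    rows.length ≤ 2 → pvSweepB rows none none none none = rows := by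
  induction rows using List.reverseRecOn with
  | nil => intro _; rfl
  | append_singleton xs r ih =>
    intro h
    simp only [List.length_append, List.length_cons, List.length_nil] at h
    rw [pvSweepB_append, pvProc_short r xs (by omega), ih (by omega)]

theorem pvA_short (rows : List (List String)) (h : rows.length ≤ 2) :
    reading_stuck_at rows = rows := by
  rw [pvMain]
  exact pvSweepB_short rows h

-- ===== VERDICT (by name: the statement is the Claim_ definition above) =====
theorem reading_stuck_at_spec : Claim_equal_reading_stuck_at := by
  intro rows _ _
  unfold Spec_reading_stuck_at reading_stuck_at_alt
  by_cases h : rows.length < 3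
  · rw [if_pos h]
    exact pvA_short rows (by omega)
  · rw [if_neg h]
    exact pvMain rows
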